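-- pv_equiv track=rewrite | github.com/nadxelleHernandez/algorithm_practice | algorithm_practice/my_algorithms.py | send_smallest_to_front
-- ===== SOURCE A (Python) =====
-- def send_smallest_to_front(lst):
--     if not lst:
--         return lst
--
--     smallest = lst[0]
--     smallest_index = 0
--     for index in range(len(lst)):
--         if lst[index] < smallest:
--             smallest = lst[index]
--             smallest_index = index
--
--     for i in range(smallest_index-1,-1,-1):
--         lst[i+1] = lst[i]
--
--     lst[0] = smallest
--     return lst
-- ===== SOURCE B (Python) =====
-- def send_smallest_to_front(lst):
--     if not lst:
--         return lst
--
--     i = lst.index(min(lst))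
--     lst[:] = [lst[i]] + lst[:i] + lst[i + 1:]
--     return lst
-- ===== Notes on version B (the rewrite author's own statement) =====
-- stated objective: simpler
-- what changed: Replaces A's hand-rolled running-min scan and element-by-element downward shift loop with min()+index() to locate the first minimum and a single slice rebuild written back in place.
import Mathlib
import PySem

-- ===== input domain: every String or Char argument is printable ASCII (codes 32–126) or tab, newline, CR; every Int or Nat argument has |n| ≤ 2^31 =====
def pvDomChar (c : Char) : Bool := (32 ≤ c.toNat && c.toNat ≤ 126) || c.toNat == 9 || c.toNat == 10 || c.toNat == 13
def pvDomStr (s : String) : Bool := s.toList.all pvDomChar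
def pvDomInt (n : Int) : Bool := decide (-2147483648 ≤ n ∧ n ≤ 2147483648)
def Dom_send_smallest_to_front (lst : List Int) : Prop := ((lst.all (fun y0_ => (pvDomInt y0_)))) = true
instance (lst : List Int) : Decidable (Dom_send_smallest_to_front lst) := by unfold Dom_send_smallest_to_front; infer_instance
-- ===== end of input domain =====

-- B replaces A's running-min scan plus downward shift loop by min()+index() and one slice rebuild (simpler).
-- Both Pythons mutate lst in place identically (same final contents); the equivalence proved is about the return value.

-- ===== PORT A =====
def send_smallest_to_front (lst : List Int) : List Int :=
  if lst = [] then lst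
  else
    -- smallest = lst[0]; smallest_index = 0; for index in range(len(lst)): …
    let st :=
      (PySem.List.pyRange 0 (PySem.List.len lst) 1).foldl
        (fun (st : Int × Int) index =>
          if PySem.List.pyGetD lst index 0 < st.1 then (PySem.List.pyGetD lst index 0, index) else st)
        (PySem.List.pyGetD lst 0 0, 0)
    -- for i in range(smallest_index-1, -1, -1): lst[i+1] = lst[i]
    let lst2 :=
      (PySem.List.pyRange (st.2 - 1) (-1) (-1)).foldl
        (fun (l : List Int) i => PySem.List.pySetD l (i + 1) (PySem.List.pyGetD l i 0)) lst
    -- lst[0] = smallest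
    PySem.List.pySetD lst2 0 st.1

-- ===== PORT B =====
def send_smallest_to_front_alt (lst : List Int) : List Int :=
  if lst = [] then lst
  else
    -- i = lst.index(min(lst))
    let m := (PySem.List.min? lst (fun x => x)).getD 0
    let i := ((PySem.List.index? lst m).getD 0 : Nat)
    -- lst[:] = [lst[i]] + lst[:i] + lst[i+1:]
    [PySem.List.pyGetD lst (i : Int) 0] ++
      PySem.List.slice lst none (some (i : Int)) ++
      PySem.List.slice lst (some ((i : Int) + 1)) none

-- ===== PRECONDITION & SPEC =====
def Spec_send_smallest_to_front (lst : List Int) (out : List Int) : Prop := out = send_smallest_to_front_alt lst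
instance (lst : List Int) (out : List Int) : Decidable (Spec_send_smallest_to_front lst out) := by unfold Spec_send_smallest_to_front; infer_instance

-- ===== CLAIM (what is proved, stated in full; the proofs are below) =====
def Claim_equal_send_smallest_to_front : Prop := ∀ (lst : List Int), Dom_send_smallest_to_front lst → Spec_send_smallest_to_front lst (send_smallest_to_front lst)

-- ===== LEMMAS AND PROOFS =====

-- the running minimum of A's first loop is bounded by its seed
lemma foldl_min_le_init (t : List Int) (s : Int) : t.foldl min s ≤ s := by
  induction t generalizing s with
  | nil => simp
  | cons x t ih => exact le_trans (ih (min s x)) (min_le_left _ _)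

-- A's first loop (as a fold over enumerate): running minimum and first index achieving it
lemma foldmin_spec (t : List Int) (p s k : Int) :
    (PySem.List.enumerate t p).foldl
        (fun (st : Int × Int) (q : Int × Int) => if q.2 < st.1 then (q.2, q.1) else st) (s, k)
      = (t.foldl min s, if t.foldl min s < s then p + (t.idxOf (t.foldl min s) : Int) else k) := by
  induction t generalizing p s k with
  | nil => simp
  | cons x t ih =>
    rw [PySem.List.enumerate_cons, List.foldl_cons]
    by_cases hx : x < s
    · simp only [hx, if_pos]
      rw [ih]
      have hmin : min s x = x := by omega
      have hle : t.foldl min x ≤ x := foldl_min_le_init t x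
      by_cases hlt : t.foldl min x < x
      · have hne : x ≠ t.foldl min x := by omega
        have hs : t.foldl min x < s := by omega
        simp [List.foldl_cons, hmin, hlt, hne, hs]
        omega
      · have hx' : t.foldl min x = x := by omega
        simp [List.foldl_cons, hmin, hx', hx]
    · simp only [hx, if_false]
      rw [ih]
      have hmin : min s x = s := by omega
      have hle : t.foldl min s ≤ s := foldl_min_le_init t s
      simp only [List.foldl_cons, hmin]
      by_cases hlt : t.foldl min s < s
      · have hne : x ≠ t.foldl min s := by omega
        simp [hlt, hne]
        omega
      · simp [hlt]

-- A's second loop: shifting lst[i+1] = lst[i] for i = j-1 … 0 copies the prefix one slot right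
lemma shift_spec (j : Nat) : ∀ (l : List Int), j < l.length →
    (PySem.List.pyRange ((j : Int) - 1) (-1) (-1)).foldl
        (fun (l2 : List Int) i => PySem.List.pySetD l2 (i + 1) (PySem.List.pyGetD l2 i 0)) l
      = l.take 1 ++ (l.take j ++ l.drop (j + 1)) := by
  induction j with
  | zero =>
    intro l hl
    rw [PySem.List.pyRange_neg_one_eq_nil (by omega), List.foldl_nil]
    conv_lhs => rw [← List.take_append_drop 1 l]
    simp
  | succ j ih =>
    intro l hl
    have hj : j < l.length := by omega
    have htake : l.take (j + 1) = l.take j ++ [l[j]] := by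
      rw [List.take_add_one, List.getElem?_eq_getElem hj]; rfl
    rw [show (((j + 1 : Nat)) : Int) - 1 = (j : Int) by push_cast; ring,
        PySem.List.pyRange_neg_one_cons (by omega : (-1 : Int) < (j : Int)), List.foldl_cons,
        PySem.List.pyGetD_natCast, List.getD_eq_getElem l 0 hj,
        PySem.List.pySetD_of_nonneg _ _ (by omega : (0:Int) ≤ (j:Int)+1),
        show ((j : Int) + 1).toNat = j + 1 by omega,
        ih (l.set (j + 1) l[j]) (by simpa using hj)]
    rw [List.take_set_of_le (by omega : (1:Nat) ≤ j + 1),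
        List.take_set_of_le (by omega : (j:Nat) ≤ j + 1),
        List.drop_set, if_neg (by omega), Nat.sub_self,
        List.drop_eq_getElem_cons hl, List.set_cons_zero, htake,
        List.append_assoc, List.singleton_append]

-- min(lst) as a foldl stays inside the list
lemma foldl_min_mem (t : List Int) (s : Int) : t.foldl min s ∈ s :: t := by
  induction t generalizing s with
  | nil => simp
  | cons x t ih =>
    rw [List.foldl_cons]
    rcases List.mem_cons.mp (ih (min s x)) with h2 | h2
    · rw [h2]
      rcases min_choice s x with h | h <;> rw [h]
      · exact List.mem_cons_self
      · exact List.mem_cons_of_mem _ List.mem_cons_self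
    · exact List.mem_cons_of_mem _ (List.mem_cons_of_mem _ h2)

-- idxOf? of a member is some idxOf
lemma idxOf?_of_mem (l : List Int) (a : Int) (h : a ∈ l) : l.idxOf? a = some (l.idxOf a) := by
  induction l with
  | nil => simp at h
  | cons x t ih =>
    by_cases hx : x = a
    · subst hx; simp [List.idxOf?_cons]
    · rcases List.mem_cons.mp h with h1 | h2
      · exact absurd h1.symm hx
      · simp [List.idxOf?_cons, ih h2, Ne, fun e => hx (by omega)]

-- ===== VERDICT (by name: the statement is the Claim_ definition above) =====
theorem send_smallest_to_front_spec : Claim_equal_send_smallest_to_front := by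
  intro lst _
  unfold Spec_send_smallest_to_front send_smallest_to_front send_smallest_to_front_alt
  cases lst with
  | nil => simp
  | cons h t =>
    simp only [if_neg (List.cons_ne_nil h t)]
    set m : Int := t.foldl min h with hm
    have hmem : m ∈ h :: t := foldl_min_mem t h
    set j : Nat := (h :: t).idxOf m with hj
    have hjlt : j < (h :: t).length := List.idxOf_lt_length_of_mem hmem
    -- B side
    have hB : (PySem.List.min? (h :: t) (fun x => x)).getD 0 = m := by
      rw [PySem.List.min?_id_cons]; rfl
    have hBi : ((PySem.List.index? (h :: t) m).getD 0 : Nat) = j := by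
      rw [PySem.List.index?_eq_idxOf?, idxOf?_of_mem _ _ hmem]; rfl
    have hBget : PySem.List.pyGetD (h :: t) ((j : Int)) 0 = m := by
      rw [PySem.List.pyGetD_natCast, List.getD_eq_getElem _ 0 hjlt]
      exact List.getElem_idxOf hjlt
    -- A's first loop
    have hA1 : ((PySem.List.pyRange 0 (PySem.List.len (h :: t)) 1).foldl
        (fun (st : Int × Int) index =>
          if PySem.List.pyGetD (h :: t) index 0 < st.1
          then (PySem.List.pyGetD (h :: t) index 0, index) else st)
        (PySem.List.pyGetD (h :: t) 0 0, 0)) = (m, (j : Int)) := by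
      rw [show (PySem.List.pyGetD (h :: t) 0 0) = h from PySem.List.pyGetD_zero_cons h t 0]
      have := PySem.List.enumerate_eq_map_pyRange (h :: t) (0 : Int)
      rw [show (PySem.List.pyRange 0 (PySem.List.len (h :: t)) 1).foldl
            (fun (st : Int × Int) index =>
              if PySem.List.pyGetD (h :: t) index 0 < st.1
              then (PySem.List.pyGetD (h :: t) index 0, index) else st) (h, 0)
          = (PySem.List.enumerate (h :: t) 0).foldl
              (fun (st : Int × Int) (q : Int × Int) =>
                if q.2 < st.1 then (q.2, q.1) else st) (h, 0) by
        rw [this, List.foldl_map]]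
      rw [PySem.List.enumerate_cons, List.foldl_cons]
      simp only [if_neg (lt_irrefl h)]
      rw [foldmin_spec, ← hm]
      have hle : m ≤ h := foldl_min_le_init t h
      by_cases hlt : m < h
      · have hne : h ≠ m := by omega
        rw [if_pos hlt, hj]
        simp [hne]
        omega
      · have he : m = h := by omega
        rw [if_neg hlt, hj, he]
        simp
    rw [hA1]
    -- A's second loop + final write
    rw [show ((m, (j : Int)).2 - 1) = (j : Int) - 1 from rfl]
    rw [shift_spec j (h :: t) hjlt]
    rw [PySem.List.pySetD_of_nonneg _ _ (by omega : (0:Int) ≤ 0), Int.toNat_zero]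
    -- B's value
    rw [hB, hBi, hBget,
        PySem.List.slice_to_natCast,
        show ((j : Int) + 1) = (((j + 1 : Nat)) : Int) by push_cast; ring,
        PySem.List.slice_from_natCast]
    simp [List.set_cons_zero]
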